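-- pv_equiv track=rewrite | github.com/Enigma7484/Geospatial-Mappings-in-Navigation-via-Knowledge-GraphRAG | app/routing.py | interleave_unique_route_lists
-- ===== SOURCE A (Python) =====
-- def interleave_unique_route_lists(route_lists, max_routes):
--     out, seen = [], set()
--     max_len = max((len(lst) for lst in route_lists), default=0)
--     for i in range(max_len):
--         for lst in route_lists:
--             if i < len(lst):
--                 route = lst[i]
--                 key = tuple(route)
--                 if key not in seen:
--                     seen.add(key)
--                     out.append(route)
--                     if len(out) >= max_routes:
--                         return out
--     return out
-- ===== SOURCE B (Python) =====
-- def interleave_unique_route_lists(route_lists, max_routes):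
--     # Phase 1: flatten in column-major order by structural recursion on tails
--     # (peel the first element of every live list, keep the nonempty tails).
--     order = []
--     cols = [l for l in route_lists if l]
--     while cols:
--         order.extend(l[0] for l in cols)
--         cols = [l[1:] for l in cols if len(l) > 1]
--     # Phase 2: one linear dedup-and-cap pass over the flattened sequence.
--     out, seen = [], set()
--     for route in order:
--         key = tuple(route)
--         if key not in seen:
--             seen.add(key)
--             out.append(route)
--             if len(out) >= max_routes:
--                 break
--     return out
-- ===== Notes on version B (the rewrite author's own statement) =====
-- stated objective: alternative
-- what changed: Replaces the index-based double loop (range over max length, inner scan with i < len checks) by a two-phase algorithm: a structural peel-the-heads recursion over live tails that flattens the lists column-major without any index arithmetic, followed by one linear dedup-and-cap pass.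
import Mathlib
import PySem

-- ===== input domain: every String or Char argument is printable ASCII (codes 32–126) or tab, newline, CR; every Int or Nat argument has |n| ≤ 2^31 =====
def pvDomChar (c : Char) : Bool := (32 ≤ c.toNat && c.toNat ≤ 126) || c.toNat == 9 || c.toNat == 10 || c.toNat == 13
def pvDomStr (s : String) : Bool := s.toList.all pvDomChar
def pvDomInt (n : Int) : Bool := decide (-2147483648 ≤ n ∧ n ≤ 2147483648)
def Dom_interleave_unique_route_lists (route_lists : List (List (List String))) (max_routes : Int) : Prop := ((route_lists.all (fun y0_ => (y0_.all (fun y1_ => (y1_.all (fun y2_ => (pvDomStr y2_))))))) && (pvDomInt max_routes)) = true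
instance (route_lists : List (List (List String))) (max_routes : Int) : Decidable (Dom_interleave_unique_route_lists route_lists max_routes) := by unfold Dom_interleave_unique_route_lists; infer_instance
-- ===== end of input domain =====

-- B replaces A's index-based double loop by a structural peel-the-heads column-major
-- flattening followed by one linear dedup-and-cap pass (objective: alternative).

-- ===== PORT A =====
-- inner 'for lst in route_lists' body for a fixed column index i; .inr = early 'return out'
def aInner (m : Int) (i : Nat) : List (List (List String)) → List (List String) × PySem.Set (List String) → (List (List String) × PySem.Set (List String)) ⊕ List (List String)
  | [], st => .inl st
  | lst :: rest, st =>
    if i < lst.length then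
      let route := (lst[i]?).getD []   -- exact: the guard ensures i < len(lst)
      if PySem.Set.contains st.2 route then aInner m i rest st
      else
        let seen' := PySem.Set.add st.2 route
        let out' := st.1 ++ [route]
        if m ≤ (out'.length : Int) then .inr out'
        else aInner m i rest (out', seen')
    else aInner m i rest st

-- outer 'for i in range(max_len)' loop
def aOuter (m : Int) (rl : List (List (List String))) : List Nat → List (List String) × PySem.Set (List String) → (List (List String) × PySem.Set (List String)) ⊕ List (List String)
  | [], st => .inl st
  | i :: is, st =>
    match aInner m i rl st with
    | .inl st' => aOuter m rl is st'
    | .inr o => .inr o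

def interleave_unique_route_lists (route_lists : List (List (List String))) (max_routes : Int) : List (List String) :=
  -- max((len(lst) for lst in route_lists), default=0): lengths are ≥ 0, so foldl max 0 is exact
  let maxLen := (route_lists.map List.length).foldl max 0
  match aOuter max_routes route_lists (List.range maxLen) ([], PySem.Set.ofList []) with
  | .inl st => st.1
  | .inr o => o

-- ===== PORT B =====
def pvMeas (cols : List (List (List String))) : Nat := (cols.map (fun l => l.length + 1)).sum

theorem pvMeas_cons (c : List (List String)) (rest : List (List (List String))) :
    pvMeas (c :: rest) = (c.length + 1) + pvMeas rest := by
  simp [pvMeas]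

theorem pvMeas_filterMap_le (cols : List (List (List String))) :
    pvMeas (cols.filterMap (fun l => if 1 < l.length then some l.tail else none)) + cols.length ≤ pvMeas cols := by
  induction cols with
  | nil => simp [pvMeas]
  | cons c rest ih =>
    by_cases h : 1 < c.length
    · have e : (c :: rest).filterMap (fun l => if 1 < l.length then some l.tail else none)
          = c.tail :: rest.filterMap (fun l => if 1 < l.length then some l.tail else none) := by
        simp [h]
      rw [e, pvMeas_cons, pvMeas_cons]
      have ht : c.tail.length = c.length - 1 := List.length_tail
      simp only [List.length_cons]
      omega
    · have e : (c :: rest).filterMap (fun l => if 1 < l.length then some l.tail else none)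
          = rest.filterMap (fun l => if 1 < l.length then some l.tail else none) := by
        simp [h]
      rw [e, pvMeas_cons]
      simp only [List.length_cons]
      omega

-- the 'while cols:' flattening loop: heads of every live list, then recurse on nonempty tails
def bCols : List (List (List String)) → List (List String)
  | [] => []
  | c :: rest =>
    ((c :: rest).map (fun l => l.headD [])) ++   -- exact: every live list is nonempty
      bCols ((c :: rest).filterMap (fun l => if 1 < l.length then some l.tail else none))
termination_by cols => pvMeas cols
decreasing_by
  simp only [dite_eq_ite]
  have := pvMeas_filterMap_le (c :: rest)
  simp only [List.length_cons] at this
  omega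

-- the linear dedup-and-cap pass
def bScan (m : Int) : List (List String) → PySem.Set (List String) → List (List String) → List (List String)
  | [], _, out => out
  | r :: rs, seen, out =>
    if PySem.Set.contains seen r then bScan m rs seen out
    else
      let seen' := PySem.Set.add seen r
      let out' := out ++ [r]
      if m ≤ (out'.length : Int) then out'
      else bScan m rs seen' out'

def interleave_unique_route_lists_alt (route_lists : List (List (List String))) (max_routes : Int) : List (List String) :=
  bScan max_routes (bCols (route_lists.filter (fun l => !l.isEmpty))) (PySem.Set.ofList []) []

-- ===== PRECONDITION & SPEC =====
def Spec_interleave_unique_route_lists (route_lists : List (List (List String))) (max_routes : Int) (out : List (List String)) : Prop := out = interleave_unique_route_lists_alt route_lists max_routes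
instance (route_lists : List (List (List String))) (max_routes : Int) (out : List (List String)) : Decidable (Spec_interleave_unique_route_lists route_lists max_routes out) := by unfold Spec_interleave_unique_route_lists; infer_instance

-- ===== CLAIM (what is proved, stated in full; the proofs are below) =====
def Claim_equal_interleave_unique_route_lists : Prop := ∀ (route_lists : List (List (List String))) (max_routes : Int), Dom_interleave_unique_route_lists route_lists max_routes → Spec_interleave_unique_route_lists route_lists max_routes (interleave_unique_route_lists route_lists max_routes)

-- ===== LEMMAS AND PROOFS =====

-- generic early-exit run of the shared dedup/cap step over a flat sequence
def runE (m : Int) : List (List String) → List (List String) × PySem.Set (List String) → (List (List String) × PySem.Set (List String)) ⊕ List (List String)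
  | [], st => .inl st
  | r :: rs, st =>
    if PySem.Set.contains st.2 r then runE m rs st
    else
      let seen' := PySem.Set.add st.2 r
      let out' := st.1 ++ [r]
      if m ≤ (out'.length : Int) then .inr out'
      else runE m rs (out', seen')

theorem runE_append (m : Int) (xs ys : List (List String)) (st : List (List String) × PySem.Set (List String)) :
    runE m (xs ++ ys) st = (match runE m xs st with | .inl st' => runE m ys st' | .inr o => .inr o) := by
  induction xs generalizing st with
  | nil => simp [runE]
  | cons r rs ih =>
    simp only [List.cons_append, runE]
    split_ifs with h1 h2 <;> simp [ih]

theorem aInner_eq (m : Int) (i : Nat) (ls : List (List (List String))) (st : List (List String) × PySem.Set (List String)) :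
    aInner m i ls st = runE m (ls.filterMap (fun l => l[i]?)) st := by
  induction ls generalizing st with
  | nil => simp [aInner, runE]
  | cons l rest ih =>
    by_cases h : i < l.length
    · have hg : l[i]? = some l[i] := List.getElem?_eq_getElem h
      simp only [aInner, if_pos h, List.filterMap_cons, hg, runE, Option.getD_some]
      split_ifs with h1 h2 <;> simp [ih]
    · have hg : l[i]? = none := List.getElem?_eq_none (by omega)
      simp [aInner, if_neg h, hg, ih]

theorem aOuter_eq (m : Int) (rl : List (List (List String))) (is : List Nat) (st : List (List String) × PySem.Set (List String)) :
    aOuter m rl is st = runE m (is.flatMap (fun i => rl.filterMap (fun l => l[i]?))) st := by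
  induction is generalizing st with
  | nil => simp [aOuter, runE]
  | cons i is ih =>
    simp only [aOuter, List.flatMap_cons, runE_append, aInner_eq]
    cases runE m (rl.filterMap (fun l => l[i]?)) st <;> simp [ih]

theorem bScan_eq (m : Int) (rs : List (List String)) (seen : PySem.Set (List String)) (out : List (List String)) :
    bScan m rs seen out = (match runE m rs (out, seen) with | .inl st => st.1 | .inr o => o) := by
  induction rs generalizing seen out with
  | nil => simp [bScan, runE]
  | cons r rest ih =>
    simp only [bScan, runE]
    split_ifs with h1 h2 <;> simp [ih]

-- column shift: column i+1 of cols = column i of the kept tails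
theorem col_shift (cols : List (List (List String))) (i : Nat) :
    cols.filterMap (fun l => l[i+1]?) =
      (cols.filterMap (fun l => if 1 < l.length then some l.tail else none)).filterMap (fun l => l[i]?) := by
  induction cols with
  | nil => simp
  | cons c rest ih =>
    cases c with
    | nil => simp [ih]
    | cons a as =>
      cases as with
      | nil => simp [ih]
      | cons b bs =>
        have hs : ((a :: b :: bs : List (List String)))[i+1]? = (b :: bs)[i]? := rfl
        have hc : 1 < (a :: b :: bs : List (List String)).length := by simp
        simp only [List.filterMap_cons, hs, if_pos hc, List.tail_cons, ih]

-- column 0 of all-nonempty cols = the heads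
theorem col_zero (cols : List (List (List String))) (h : ∀ l ∈ cols, l ≠ []) :
    cols.filterMap (fun l => l[0]?) = cols.map (fun l => l.headD []) := by
  induction cols with
  | nil => simp
  | cons c rest ih =>
    have hc : c ≠ [] := h c (by simp)
    cases c with
    | nil => exact absurd rfl hc
    | cons a as =>
      simp only [List.filterMap_cons, List.getElem?_cons_zero, List.map_cons, List.headD_cons]
      rw [ih (fun l hl => h l (by simp [hl]))]

theorem bCols_nil : bCols [] = [] := by
  rw [bCols]

theorem bCols_cons (c : List (List String)) (rest : List (List (List String))) :
    bCols (c :: rest) =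
      ((c :: rest).map (fun l => l.headD [])) ++
        bCols ((c :: rest).filterMap (fun l => if 1 < l.length then some l.tail else none)) := by
  rw [bCols]

theorem flatMap_congr' {α β : Type} (l : List α) (f g : α → List β) (h : ∀ a ∈ l, f a = g a) :
    l.flatMap f = l.flatMap g := by
  induction l with
  | nil => rfl
  | cons x xs ih =>
    simp only [List.flatMap_cons, h x (by simp), ih (fun a ha => h a (by simp [ha]))]

theorem bCols_eq (n : Nat) (cols : List (List (List String)))
    (hne : ∀ l ∈ cols, l ≠ []) (hlen : ∀ l ∈ cols, l.length ≤ n) :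
    bCols cols = (List.range n).flatMap (fun i => cols.filterMap (fun l => l[i]?)) := by
  induction n generalizing cols with
  | zero =>
    cases cols with
    | nil => simp [bCols_nil]
    | cons c rest =>
      have h1 := hlen c (by simp)
      have h2 := hne c (by simp)
      cases c with
      | nil => exact absurd rfl h2
      | cons a as => simp at h1
  | succ n ih =>
    cases cols with
    | nil => simp [bCols_nil]
    | cons c rest =>
      rw [bCols_cons, List.range_succ_eq_map, List.flatMap_cons]
      have hrec := ih ((c :: rest).filterMap (fun l => if 1 < l.length then some l.tail else none))
        (by
          intro l hl
          simp only [List.mem_filterMap] at hl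
          obtain ⟨l', _, hl'⟩ := hl
          by_cases h : 1 < l'.length
          · simp only [h, if_pos, Option.some_inj] at hl'
            subst hl'
            intro hnil
            have := List.length_tail (l := l')
            rw [hnil] at this
            simp at this; omega
          · simp [h] at hl')
        (by
          intro l hl
          simp only [List.mem_filterMap] at hl
          obtain ⟨l', hmem, hl'⟩ := hl
          by_cases h : 1 < l'.length
          · simp only [h, if_pos, Option.some_inj] at hl'
            subst hl'
            have := hlen l' hmem
            have := List.length_tail (l := l')
            omega
          · simp [h] at hl')
      rw [hrec, col_zero _ hne]
      congr 1
      rw [List.flatMap_map]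
      exact flatMap_congr' _ _ _ (fun i _ => (col_shift (c :: rest) i).symm)

-- empty lists contribute nothing to any column
theorem col_filter (rl : List (List (List String))) (i : Nat) :
    (rl.filter (fun l => !l.isEmpty)).filterMap (fun l => l[i]?) = rl.filterMap (fun l => l[i]?) := by
  induction rl with
  | nil => simp
  | cons c rest ih =>
    cases c with
    | nil => simp [ih]
    | cons a as =>
      cases hx : (a :: as)[i]? <;> simp [List.filterMap_cons, hx, ih]

theorem le_foldl_max (xs : List Nat) (a : Nat) :
    a ≤ xs.foldl max a ∧ ∀ x ∈ xs, x ≤ xs.foldl max a := by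
  induction xs generalizing a with
  | nil => simp
  | cons x rest ih =>
    simp only [List.foldl_cons]
    obtain ⟨h1, h2⟩ := ih (max a x)
    refine ⟨le_trans (le_max_left a x) h1, ?_⟩
    intro y hy
    rcases List.mem_cons.mp hy with h | h
    · subst h
      exact le_trans (le_max_right _ _) h1
    · exact h2 y h

theorem interleave_unique_route_lists_spec' (route_lists : List (List (List String))) (max_routes : Int) :
    interleave_unique_route_lists route_lists max_routes = interleave_unique_route_lists_alt route_lists max_routes := by
  have hne : ∀ l ∈ route_lists.filter (fun l => !l.isEmpty), l ≠ [] := by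
    intro l hl
    have := List.of_mem_filter hl
    simpa [List.isEmpty_iff] using this
  have hlen : ∀ l ∈ route_lists.filter (fun l => !l.isEmpty),
      l.length ≤ (route_lists.map List.length).foldl max 0 := by
    intro l hl
    have hm : l ∈ route_lists := List.mem_of_mem_filter hl
    exact (le_foldl_max (route_lists.map List.length) 0).2 l.length (List.mem_map_of_mem hm)
  have hcols : bCols (route_lists.filter (fun l => !l.isEmpty)) =
      (List.range ((route_lists.map List.length).foldl max 0)).flatMap
        (fun i => route_lists.filterMap (fun l => l[i]?)) := by
    rw [bCols_eq _ _ hne hlen]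
    exact flatMap_congr' _ _ _ (fun i _ => col_filter route_lists i)
  show (match aOuter max_routes route_lists
          (List.range ((route_lists.map List.length).foldl max 0)) ([], PySem.Set.ofList []) with
        | .inl st => st.1
        | .inr o => o) =
      bScan max_routes (bCols (route_lists.filter (fun l => !l.isEmpty))) (PySem.Set.ofList []) []
  rw [hcols, aOuter_eq, bScan_eq]

-- ===== VERDICT (by name: the statement is the Claim_ definition above) =====
theorem interleave_unique_route_lists_spec : Claim_equal_interleave_unique_route_lists := by
  intro rl m _
  exact interleave_unique_route_lists_spec' rl m
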